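-- pv_equiv track=rewrite | github.com/Summerimm/TIL | python/practice/python_08_1_P.py | kkak
-- ===== SOURCE A (Python) =====
-- def kkak(datalist):
--     anslist = []
--     for d in datalist:
--         if d not in anslist:
--             anslist.append(d)
--         else:
--             anslist.remove(d)
--     return anslist[0]
-- ===== SOURCE B (Python) =====
-- def kkak(datalist):
--     # one counting pass, then a reverse scan over last occurrences:
--     # the first remaining element after all toggle-cancels is the odd-count
--     # element whose last occurrence comes earliest.
--     parity = {}
--     for d in datalist:
--         parity[d] = not parity.get(d, False)
--     ans = None
--     seen = set()
--     for d in reversed(datalist):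
--         if d not in seen:
--             seen.add(d)
--             if parity[d]:
--                 ans = d
--     return ans
-- ===== Notes on version B (the rewrite author's own statement) =====
-- stated objective: faster
-- what changed: A repeatedly scans and mutates a toggle list (membership test, append, remove) and returns its first element; B makes one dict pass to record each value's count parity and then one reverse scan over last occurrences, returning the odd-parity value whose last occurrence comes earliest.
import Mathlib
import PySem

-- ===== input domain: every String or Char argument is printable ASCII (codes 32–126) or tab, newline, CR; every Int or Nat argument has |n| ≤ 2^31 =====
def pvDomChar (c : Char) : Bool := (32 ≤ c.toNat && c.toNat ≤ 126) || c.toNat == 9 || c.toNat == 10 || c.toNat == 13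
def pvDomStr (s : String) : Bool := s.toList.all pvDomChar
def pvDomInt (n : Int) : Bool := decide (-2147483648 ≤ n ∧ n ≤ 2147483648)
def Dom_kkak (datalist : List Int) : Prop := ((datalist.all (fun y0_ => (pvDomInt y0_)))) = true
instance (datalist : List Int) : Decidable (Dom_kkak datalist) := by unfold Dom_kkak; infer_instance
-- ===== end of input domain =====

-- B replaces A's quadratic toggle list (membership test + remove inside the loop) by one
-- counting pass plus a reverse scan over last occurrences.

-- ===== PORT A =====
-- the loop body: toggle d in the running list (append if absent, remove first occurrence else)
def kkakStep (ans : List Int) (d : Int) : List Int :=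
  if d ∉ ans then ans ++ [d] else (PySem.List.remove? ans d).getD ans

def kkak (datalist : List Int) : Int :=
  let anslist := datalist.foldl kkakStep []
  (PySem.List.pyGet? anslist 0).getD 0   -- anslist[0]; Pre_ guarantees nonempty

-- ===== PORT B =====
def kkak_alt (datalist : List Int) : Int :=
  let parity : PySem.Dict Int Bool :=
    datalist.foldl (fun p d => p.insert d (!(p.getD d false))) PySem.Dict.empty
  let st : PySem.Set Int × Option Int :=
    datalist.reverse.foldl
      (fun (st : PySem.Set Int × Option Int) d =>
        if st.1.contains d then st
        else (PySem.Set.add st.1 d, if parity.getD d false then some d else st.2))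
      (PySem.Set.empty, none)
  -- Python returns ans (None only outside Pre_); parity[d] is a sure lookup, ported as getD
  st.2.getD 0

-- ===== PRECONDITION & SPEC =====
-- excludes exactly the inputs on which A raises IndexError (every element occurs an even
-- number of times, so the toggle list ends empty)
def Pre_kkak (datalist : List Int) : Prop := ∃ d ∈ datalist, datalist.count d % 2 = 1
instance (datalist : List Int) : Decidable (Pre_kkak datalist) := by unfold Pre_kkak; infer_instance
def pvWitness_kkak : List Int := [2, 7, 2, 2]

def Spec_kkak (datalist : List Int) (out : Int) : Prop := out = kkak_alt datalist
instance (datalist : List Int) (out : Int) : Decidable (Spec_kkak datalist out) := by unfold Spec_kkak; infer_instance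

-- ===== CLAIM (what is proved, stated in full; the proofs are below) =====
def Claim_equal_kkak : Prop := ∀ (datalist : List Int), Dom_kkak datalist → Pre_kkak datalist → Spec_kkak datalist (kkak datalist)

-- ===== LEMMAS AND PROOFS =====

-- elements of `t` not yet in the seen-set `S`, first occurrences only, in order
def firstsS : List Int → PySem.Set Int → List Int
  | [], _ => []
  | d :: t, S => if S.contains d then firstsS t S else d :: firstsS t (PySem.Set.add S d)

-- Bool "n is odd"
def oddb (n : Nat) : Bool := n % 2 == 1


theorem setContains_true (S : PySem.Set Int) (x : Int) (h : x ∈ S) : S.contains x = true :=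
  (PySem.Set.contains_iff S x).2 h

theorem setContains_false (S : PySem.Set Int) (x : Int) (h : x ∉ S) : S.contains x = false := by
  cases hc : S.contains x
  · rfl
  · exact absurd ((PySem.Set.contains_iff S x).1 hc) h

theorem firstsS_congr (t : List Int) (S S' : PySem.Set Int)
    (h : ∀ x : Int, x ∈ S ↔ x ∈ S') : firstsS t S = firstsS t S' := by
  induction t generalizing S S' with
  | nil => rfl
  | cons d t ih =>
    have hc : S.contains d = S'.contains d := by
      by_cases hd : d ∈ S
      · rw [setContains_true _ _ hd, setContains_true _ _ ((h d).1 hd)]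
      · rw [setContains_false _ _ hd, setContains_false _ _ (fun hx => hd ((h d).2 hx))]
    simp only [firstsS, hc]
    split
    · exact ih S S' h
    · rw [ih (PySem.Set.add S d) (PySem.Set.add S' d)
        (fun x => by simp [PySem.Set.mem_add, h x])]

theorem mem_firstsS (t : List Int) (S : PySem.Set Int) (x : Int) :
    x ∈ firstsS t S ↔ x ∈ t ∧ x ∉ S := by
  induction t generalizing S with
  | nil => simp [firstsS]
  | cons d t ih =>
    by_cases hd : d ∈ S
    · simp only [firstsS, setContains_true _ _ hd, if_true, ih, List.mem_cons]
      constructor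
      · rintro ⟨hx, hxs⟩; exact ⟨Or.inr hx, hxs⟩
      · rintro ⟨hx | hx, hxs⟩
        · exact absurd hd (hx ▸ hxs)
        · exact ⟨hx, hxs⟩
    · have hc : S.contains d = false := setContains_false _ _ hd
      simp only [firstsS, hc, Bool.false_eq_true, if_false, List.mem_cons, ih,
        PySem.Set.mem_add]
      constructor
      · rintro (rfl | ⟨hx, hxs⟩)
        · exact ⟨Or.inl rfl, hd⟩
        · exact ⟨Or.inr hx, fun h => hxs (Or.inl h)⟩
      · rintro ⟨rfl | hx, hxs⟩
        · exact Or.inl rfl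
        · by_cases hxa : x = d
          · exact Or.inl hxa
          · exact Or.inr ⟨hx, fun h => (h.elim hxs hxa)⟩

theorem nodup_firstsS (t : List Int) (S : PySem.Set Int) : (firstsS t S).Nodup := by
  induction t generalizing S with
  | nil => simp [firstsS]
  | cons d t ih =>
    simp only [firstsS]
    split
    · exact ih S
    · refine List.nodup_cons.2 ⟨fun hmem => ?_, ih _⟩
      have := (mem_firstsS t (PySem.Set.add S d) d).1 hmem
      exact this.2 (by simp [PySem.Set.mem_add])

theorem firstsS_add (t : List Int) (S : PySem.Set Int) (a : Int) (ha : a ∉ S) :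
    firstsS t (PySem.Set.add S a) = (firstsS t S).filter (fun d => d ≠ a) := by
  induction t generalizing S with
  | nil => rfl
  | cons d t ih =>
    by_cases hd : d ∈ S
    · have h1 : (PySem.Set.add S a).contains d = true :=
        setContains_true _ _ (by simp [PySem.Set.mem_add, hd])
      have h2 : S.contains d = true := setContains_true _ _ hd
      simp only [firstsS, h1, h2, if_true]
      exact ih S ha
    · by_cases hda : d = a
      · subst hda
        have h1 : (PySem.Set.add S d).contains d = true :=
          setContains_true _ _ (by simp [PySem.Set.mem_add])
        have h2 : S.contains d = false := setContains_false _ _ hd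
        simp only [firstsS, h1, h2, Bool.false_eq_true, if_false, if_true,
          List.filter_cons]
        have : (decide (d ≠ d)) = false := by simp
        rw [this]
        rw [List.filter_eq_self.2 (fun x hx => by
          have := (mem_firstsS t (PySem.Set.add S d) x).1 hx
          simp only [PySem.Set.mem_add] at this
          simp only [decide_eq_true_eq]
          exact fun hxd => this.2 (Or.inr hxd))]
        simp
      · have h1 : (PySem.Set.add S a).contains d = false :=
          setContains_false _ _ (by simp [PySem.Set.mem_add]; exact ⟨hd, hda⟩)
        have h2 : S.contains d = false := setContains_false _ _ hd
        simp only [firstsS, h1, h2, Bool.false_eq_true, if_false, List.filter_cons]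
        have hkeep : (decide (d ≠ a)) = true := by simp [hda]
        rw [hkeep]
        simp only [if_true]
        congr 1
        rw [firstsS_congr t (PySem.Set.add (PySem.Set.add S a) d)
              (PySem.Set.add (PySem.Set.add S d) a)
              (fun x => by simp [PySem.Set.mem_add]; tauto)]
        exact ih (PySem.Set.add S d) (by simp [PySem.Set.mem_add]; exact ⟨ha, fun h => hda h.symm⟩)

theorem oddb_succ (n : Nat) : oddb (n + 1) = !oddb n := by
  unfold oddb
  rcases Nat.mod_two_eq_zero_or_one n with h | h <;> simp [Nat.add_mod, h]

-- A's toggle fold equals: first occurrences of the reversed list (= last occurrences),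
-- kept iff their total count is odd, read back-to-front.
theorem kkak_fold_char (ys : List Int) :
    ys.reverse.foldl kkakStep [] =
      ((firstsS ys PySem.Set.empty).filter (fun d => oddb (ys.count d))).reverse := by
  induction ys with
  | nil => rfl
  | cons a t ih =>
    have hrev : (a :: t).reverse = t.reverse ++ [a] := by simp
    rw [hrev, List.foldl_append, ih]
    set Ht := (firstsS t PySem.Set.empty).filter (fun d => oddb (t.count d)) with hHt
    have hfs : firstsS (a :: t) PySem.Set.empty =
        a :: (firstsS t PySem.Set.empty).filter (fun d => d ≠ a) := by
      have : (PySem.Set.empty : PySem.Set Int).contains a = false := rfl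
      simp only [firstsS, this, Bool.false_eq_true, if_false]
      congr 1
      exact firstsS_add t PySem.Set.empty a (by simp [PySem.Set.empty])
    have hcount_a : (a :: t).count a = t.count a + 1 := by simp
    have hcount_ne : ∀ d : Int, d ≠ a → (a :: t).count d = t.count d := by
      intro d hd; simp [Ne.symm hd]
    -- the filtered firsts of (a :: t)
    have hfilter :
        (firstsS (a :: t) PySem.Set.empty).filter (fun d => oddb ((a :: t).count d)) =
          (if oddb (t.count a + 1) then [a] else []) ++ Ht.filter (fun d => d ≠ a) := by
      rw [hfs, List.filter_cons]
      have htail :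
          ((firstsS t PySem.Set.empty).filter (fun d => d ≠ a)).filter
              (fun d => oddb ((a :: t).count d)) = Ht.filter (fun d => d ≠ a) := by
        rw [hHt, List.filter_filter, List.filter_filter]
        apply List.filter_congr
        intro x hx
        by_cases hxa : x = a
        · simp [hxa]
        · simp [hxa, hcount_ne x hxa]
      rw [htail, hcount_a]
      by_cases hodd : oddb (t.count a + 1)
      · simp [hodd]
      · simp [hodd]
    rw [hfilter]
    have hmemHt : a ∈ Ht ↔ oddb (t.count a) := by
      rw [hHt]
      simp only [List.mem_filter, mem_firstsS]
      constructor
      · rintro ⟨_, h⟩; exact h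
      · intro h
        refine ⟨⟨?_, by simp [PySem.Set.empty]⟩, h⟩
        have : t.count a ≠ 0 := by
          intro h0; rw [h0] at h; simp [oddb] at h
        exact List.count_pos_iff.1 (Nat.pos_of_ne_zero this)
    have hnodupHt : Ht.Nodup := List.Nodup.filter _ (nodup_firstsS t _)
    by_cases hodd : oddb (t.count a) = true
    · -- a is in the toggle list: it gets removed
      have hmem : a ∈ Ht.reverse := by rw [List.mem_reverse]; exact hmemHt.2 hodd
      have hrm : PySem.List.remove? Ht.reverse a = some (Ht.reverse.erase a) :=
        PySem.List.remove?_eq_some_erase _ a hmem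
      rw [List.foldl_cons, List.foldl_nil]
      unfold kkakStep
      rw [if_neg (fun h => h hmem), hrm, Option.getD_some]
      rw [oddb_succ, hodd]
      simp only [Bool.not_true, Bool.false_eq_true, if_false, List.nil_append]
      rw [List.Nodup.erase_eq_filter (List.nodup_reverse.2 hnodupHt) a, List.filter_reverse]
      congr 1
      apply List.filter_congr
      intro x hx
      by_cases h : x = a <;> simp [h]
    · -- a absent: appended at the end
      have hodd' : oddb (t.count a) = false := by
        revert hodd; cases oddb (t.count a) <;> simp
      have hmem : a ∉ Ht.reverse := by
        rw [List.mem_reverse]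
        intro h; rw [hmemHt.1 h] at hodd'; cases hodd'
      rw [List.foldl_cons, List.foldl_nil]
      unfold kkakStep
      rw [if_pos hmem]
      rw [oddb_succ, hodd']
      simp only [Bool.not_false, if_true]
      have : Ht.filter (fun d => d ≠ a) = Ht := by
        apply List.filter_eq_self.2
        intro x hx
        simp only [decide_eq_true_eq]
        rintro rfl
        exact (hmem (List.mem_reverse.2 hx))
      rw [this, List.reverse_append, List.reverse_singleton]

-- B's parity dictionary computes count parity
theorem parity_getD (xs : List Int) (p0 : PySem.Dict Int Bool) (d : Int) :
    (xs.foldl (fun p d => p.insert d (!(p.getD d false))) p0).getD d false =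
      xor (p0.getD d false) (oddb (xs.count d)) := by
  induction xs generalizing p0 with
  | nil => simp [oddb]
  | cons a t ih =>
    simp only [List.foldl_cons, ih]
    rw [PySem.Dict.getD_insert]
    by_cases hd : d = a
    · subst hd
      rw [List.count_cons_self, oddb_succ]
      simp only [if_pos rfl]
      cases p0.getD d false <;> cases oddb (t.count d) <;> rfl
    · rw [if_neg hd]
      simp [Ne.symm hd]

-- (d :: l).getLast? written as a fallback
theorem getLast?_cons_or (d : Int) (l : List Int) :
    (d :: l).getLast? = l.getLast?.or (some d) := by
  cases l with
  | nil => rfl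
  | cons x t =>
    rw [List.getLast?_cons_cons]
    have : (x :: t).getLast?.isSome := by
      rw [List.getLast?_isSome]; simp
    obtain ⟨y, hy⟩ := Option.isSome_iff_exists.1 this
    rw [hy]; rfl

-- B's reverse scan returns the last qualifying first-occurrence, falling back to a0
theorem scan_char (pb : Int → Bool) (ys : List Int) (S : PySem.Set Int) (a0 : Option Int) :
    (ys.foldl
      (fun (st : PySem.Set Int × Option Int) d =>
        if st.1.contains d then st
        else (PySem.Set.add st.1 d, if pb d then some d else st.2))
      (S, a0)).2 =
    (((firstsS ys S).filter pb).getLast?).or a0 := by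
  induction ys generalizing S a0 with
  | nil => rfl
  | cons d t ih =>
    by_cases hd : d ∈ S
    · have hc : S.contains d = true := setContains_true _ _ hd
      simp only [List.foldl_cons, hc, if_true, firstsS, ih]
    · have hc : S.contains d = false := setContains_false _ _ hd
      simp only [List.foldl_cons, hc, Bool.false_eq_true, if_false, firstsS, ih,
        List.filter_cons]
      by_cases hp : pb d = true
      · rw [hp]
        simp only [if_true]
        rw [getLast?_cons_or]
        cases h : ((firstsS t (PySem.Set.add S d)).filter pb).getLast? <;> rfl
      · have hp' : pb d = false := by revert hp; cases pb d <;> simp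
        rw [hp']
        simp

-- ===== VERDICT (by name: the statement is the Claim_ definition above) =====
theorem kkak_spec : Claim_equal_kkak := by
  intro datalist _ _
  unfold Spec_kkak kkak kkak_alt
  have hA := kkak_fold_char datalist.reverse
  rw [List.reverse_reverse] at hA
  rw [hA]
  have hB := scan_char
    (fun d => (datalist.foldl (fun p d => p.insert d (!(p.getD d false))) PySem.Dict.empty).getD d false)
    datalist.reverse PySem.Set.empty none
  simp only [hB]
  have hfun :
      (fun d => (datalist.foldl (fun p d => p.insert d (!(p.getD d false))) PySem.Dict.empty).getD d false)
        = (fun d => oddb (datalist.reverse.count d)) := by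
    funext d
    rw [parity_getD, List.count_reverse]
    simp [PySem.Dict.getD_empty]
  rw [hfun]
  rw [PySem.List.pyGet?_zero]
  rw [Option.or_none, ← List.head?_eq_getElem?, List.head?_reverse]
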